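-- pv_equiv track=rewrite | github.com/ramaagr/Python-Chat-System | rearranger.py | denamer
-- ===== SOURCE A (Python) =====
-- def denamer(m):
--     k=0
--     name=""
--     message=""
--     for i in range(1,len(m),1):
--         if m[i]!="~" and k==0:
--             name+=m[i]
--         elif m[i]=="~":
--             k=1
--         else:
--             message+=m[i]
--     final=[name,message]
--     return final
-- ===== SOURCE B (Python) =====
-- def denamer(m):
--     name, _, rest = m[1:].partition("~")
--     return [name, rest.replace("~", "")]
-- ===== Notes on version B (the rewrite author's own statement) =====
-- stated objective: idiomatic
-- what changed: Replaces the char-by-char loop with a state flag k by slicing off the first char, str.partition on the first tilde, and str.replace to drop the remaining tildes from the message.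
import Mathlib
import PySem

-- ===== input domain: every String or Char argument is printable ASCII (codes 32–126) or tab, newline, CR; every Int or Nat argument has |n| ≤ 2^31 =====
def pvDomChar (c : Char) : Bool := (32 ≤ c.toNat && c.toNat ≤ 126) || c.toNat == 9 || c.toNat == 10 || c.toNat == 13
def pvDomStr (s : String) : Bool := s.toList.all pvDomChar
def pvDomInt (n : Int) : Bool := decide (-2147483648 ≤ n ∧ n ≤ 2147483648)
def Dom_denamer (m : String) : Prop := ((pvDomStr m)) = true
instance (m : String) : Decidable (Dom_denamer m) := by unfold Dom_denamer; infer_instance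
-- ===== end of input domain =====

-- B replaces A's char-by-char loop with a state flag by slice + partition + replace (idiomatic; return value only).

-- ===== PORT A =====
-- loop body of A: state (k, name, message), one character per step
def denamerStep (st : Int × List Char × List Char) (c : Char) : Int × List Char × List Char :=
  if c ≠ '~' ∧ st.1 = 0 then (st.1, st.2.1 ++ [c], st.2.2)
  else if c = '~' then (1, st.2.1, st.2.2)
  else (st.1, st.2.1, st.2.2 ++ [c])

-- for i in range(1, len(m), 1): … m[i] …  (i is always in range, so pyGetD's default is never used)
def denamerLoop (m : String) : Int × List Char × List Char :=
  (PySem.List.pyRange 1 (PySem.Str.len m) 1).foldl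
    (fun st i => denamerStep st (PySem.List.pyGetD m.toList i ' ')) (0, [], [])

def denamer (m : String) : List String :=
  [String.mk (denamerLoop m).2.1, String.mk (denamerLoop m).2.2]

-- ===== PORT B =====
-- s.partition("~"), ported by hand: for the 1-char separator "~" this is exactly
-- (takeWhile (· ≠ '~') s, first tilde if any, tail of dropWhile (· ≠ '~') s)
def denamer_alt (m : String) : List String :=
  [String.mk (((PySem.Str.slice m (some 1) none).toList).takeWhile (· ≠ '~')),
   String.mk (PySem.Chars.replace
     ((((PySem.Str.slice m (some 1) none).toList).dropWhile (· ≠ '~')).drop 1) ['~'] [])]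

-- ===== PRECONDITION & SPEC =====
def Spec_denamer (m : String) (out : List String) : Prop := out = denamer_alt m
instance (m : String) (out : List String) : Decidable (Spec_denamer m out) := by unfold Spec_denamer; infer_instance

-- ===== CLAIM (what is proved, stated in full; the proofs are below) =====
def Claim_equal_denamer : Prop := ∀ (m : String), Dom_denamer m → Spec_denamer m (denamer m)

-- ===== LEMMAS AND PROOFS =====

theorem foldl_step_one (cs : List Char) (n ms : List Char) :
    cs.foldl denamerStep (1, n, ms) = (1, n, ms ++ cs.filter (· ≠ '~')) := by
  induction cs generalizing ms with
  | nil => simp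
  | cons c t ih =>
    by_cases hc : c = '~' <;> simp [denamerStep, hc, ih]

theorem foldl_step_zero (cs : List Char) (n ms : List Char) :
    (cs.foldl denamerStep (0, n, ms)).2 =
      (n ++ cs.takeWhile (· ≠ '~'),
       ms ++ ((cs.dropWhile (· ≠ '~')).drop 1).filter (· ≠ '~')) := by
  induction cs generalizing n with
  | nil => simp
  | cons c t ih =>
    by_cases hc : c = '~'
    · simp [denamerStep, hc, foldl_step_one]
    · simp [denamerStep, hc, ih]

theorem replace_go_tilde (l : List Char) :
    ∀ (fuel : Nat) (acc : List Char), l.length ≤ fuel →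
      PySem.Chars.replace.go ['~'] [] fuel l acc = acc.reverse ++ l.filter (· ≠ '~') := by
  induction l with
  | nil =>
    intro fuel acc _
    cases fuel <;> simp [PySem.Chars.replace.go]
  | cons c t ih =>
    intro fuel acc hf
    cases fuel with
    | zero => simp at hf
    | succ f =>
      by_cases hc : c = '~'
      · have hp : List.isPrefixOf ['~'] (c :: t) = true := by
          simp [List.isPrefixOf, hc]
        simp only [PySem.Chars.replace.go, hp, if_pos]
        simp only [List.length_cons] at hf
        rw [show List.drop (['~'].length) (c :: t) = t from rfl,
            show ([] : List Char).reverse ++ acc = acc from rfl, ih f acc (by omega)]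
        simp [hc]
      · have hp : List.isPrefixOf ['~'] (c :: t) = false := by
          simp [List.isPrefixOf]; exact fun h => (hc h.symm).elim
        simp only [PySem.Chars.replace.go, hp]
        simp only [List.length_cons] at hf
        rw [if_neg (by simp), ih f (c :: acc) (by omega)]
        simp [hc]

theorem replace_tilde (l : List Char) :
    PySem.Chars.replace l ['~'] [] = l.filter (· ≠ '~') := by
  simp [PySem.Chars.replace, replace_go_tilde l l.length [] (le_refl _)]

-- ===== VERDICT (by name: the statement is the Claim_ definition above) =====
theorem denamer_spec : Claim_equal_denamer := by
  intro m _
  unfold Spec_denamer denamer denamer_alt denamerLoop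
  rw [PySem.Str.len_eq, PySem.List.foldl_pyRange_pyGetD' m.toList ' ' denamerStep (0, [], []) (by norm_num)]
  rw [foldl_step_zero, PySem.Str.toList_slice]
  simp [PySem.Chars.slice, PySem.List.slice_from_one, replace_tilde, List.drop_one]
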